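-- pv_equiv track=rewrite | github.com/chaehyeon7/CodingTest | workspace/cos_pro/5차_문10.py | solution
-- ===== SOURCE A (Python) =====
-- def solution(time_table, n):
--     answer = 0
--     for i in range(n):
--         x = 0
--         for j in range(len(time_table)):
--             if j % n == i:
--                 x += time_table[j]
--             if answer < x:
--                 answer = x
--     return answer
-- ===== SOURCE B (Python) =====
-- def solution(time_table, n):
--     if n <= 0:
--         return 0  # no residue classes to scan; also avoids modulo by a non-positive n
--     acc = [0] * n
--     best = 0
--     for j, t in enumerate(time_table):
--         r = j % n
--         acc[r] += t
--         if acc[r] > best: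
--             best = acc[r]
--     return best
-- ===== Notes on version B (the rewrite author's own statement) =====
-- stated objective: faster
-- what changed: replaces the per-residue rescan of the whole list (n full passes) by one single pass keeping an accumulator per residue class and a running global maximum
import Mathlib
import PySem

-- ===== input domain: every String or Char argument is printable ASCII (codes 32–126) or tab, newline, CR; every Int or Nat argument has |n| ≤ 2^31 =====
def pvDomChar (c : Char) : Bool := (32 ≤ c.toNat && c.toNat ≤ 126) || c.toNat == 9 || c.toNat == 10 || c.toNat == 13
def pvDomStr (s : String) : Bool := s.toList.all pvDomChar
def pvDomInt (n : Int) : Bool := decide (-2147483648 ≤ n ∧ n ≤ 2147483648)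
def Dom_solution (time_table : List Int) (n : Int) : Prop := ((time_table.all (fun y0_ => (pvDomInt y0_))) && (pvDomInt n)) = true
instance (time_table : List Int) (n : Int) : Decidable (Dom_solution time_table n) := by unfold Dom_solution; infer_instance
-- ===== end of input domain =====

-- B replaces A's n full rescans of the list by one single pass with a per-residue accumulator array.

-- ===== PORT A =====
-- literal port of A: for each residue i in range(n), rescan the whole table,
-- accumulating x over indices j with j % n == i and raising answer after every j.
-- (time_table[j] is ported as (pyGet? …).getD 0; j always lies in range, so the default is unreachable)
def solution (time_table : List Int) (n : Int) : Int :=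
  (PySem.List.pyRange 0 n 1).foldl (fun answer i =>
    ((PySem.List.pyRange 0 (time_table.length : Int) 1).foldl
      (fun (st : Int × Int) j =>
        let x := if PySem.Int.mod j n = i then st.2 + (PySem.List.pyGet? time_table j).getD 0 else st.2
        (if st.1 < x then x else st.1, x))
      (answer, 0)).1)
    0

-- ===== PORT B =====
-- literal port of Source B: one pass over enumerate(time_table) with an accumulator list of size n.
def solution_alt (time_table : List Int) (n : Int) : Int :=
  if n ≤ 0 then 0
  else
    ((PySem.List.enumerate time_table 0).foldl
      (fun (st : List Int × Int) p =>
        let r := PySem.Int.mod p.1 n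
        let v := PySem.List.pyGetD st.1 r 0 + p.2
        (PySem.List.pySetD st.1 r v, if st.2 < v then v else st.2))
      (List.replicate n.toNat 0, 0)).2

-- ===== PRECONDITION & SPEC =====
def Spec_solution (time_table : List Int) (n : Int) (out : Int) : Prop := out = solution_alt time_table n
instance (time_table : List Int) (n : Int) (out : Int) : Decidable (Spec_solution time_table n out) := by unfold Spec_solution; infer_instance

-- ===== CLAIM (what is proved, stated in full; the proofs are below) =====
def Claim_equal_solution : Prop := ∀ (time_table : List Int) (n : Int), Dom_solution time_table n → Spec_solution time_table n (solution time_table n)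

-- ===== LEMMAS AND PROOFS =====

-- sum of the class-i entries among the first m indices
def csum (t : List Int) (n i : Int) (m : Nat) : Int :=
  (((List.range m).filter (fun (k : Nat) => decide ((k : Int) % n = i))).map (fun k => t.getD k 0)).sum

-- the "checkpoint" value produced when index k is consumed: class sum of k's own class up to k
def chk (t : List Int) (n : Int) (k : Nat) : Int := csum t n ((k : Int) % n) (k + 1)

-- checkpoints of class i among the first m indices
def chkL (t : List Int) (n i : Int) (m : Nat) : List Int :=
  ((List.range m).filter (fun (k : Nat) => decide ((k : Int) % n = i))).map (chk t n)

-- running max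
def msup (a : Int) (l : List Int) : Int := l.foldl max a

lemma ite_lt_max (a b : Int) : (if a < b then b else a) = max a b := by
  rw [max_def]; split_ifs <;> omega

lemma le_msup (a : Int) (l : List Int) : a ≤ msup a l := (PySem.List.le_foldl_max l a).1

lemma msup_append (a : Int) (l l' : List Int) : msup a (l ++ l') = msup (msup a l) l' := by
  simp [msup, List.foldl_append]

lemma msup_singleton (a x : Int) : msup a [x] = max a x := rfl

lemma msup_perm {l l' : List Int} (h : l.Perm l') : ∀ a, msup a l = msup a l' := by
  induction h with
  | nil => intro a; rfl
  | cons x _ ih => intro a; simpa [msup] using ih (max a x)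
  | swap x y l => intro a; simp [msup, max_right_comm]
  | trans _ _ ih1 ih2 => intro a; exact (ih1 a).trans (ih2 a)

lemma csum_succ (t : List Int) (n i : Int) (m : Nat) :
    csum t n i (m + 1) = csum t n i m + (if (m : Int) % n = i then t.getD m 0 else 0) := by
  unfold csum
  rw [List.range_succ, List.filter_append, List.map_append, List.sum_append]
  congr 1
  by_cases h : (m : Int) % n = i <;> simp [h]

lemma chkL_succ (t : List Int) (n i : Int) (m : Nat) :
    chkL t n i (m + 1) = chkL t n i m ++ (if (m : Int) % n = i then [chk t n m] else []) := by
  unfold chkL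
  rw [List.range_succ, List.filter_append, List.map_append]
  congr 1
  by_cases h : (m : Int) % n = i <;> simp [h]

-- A's inner loop over range(len) computes the running max of the class-i checkpoints
lemma A_inner (t : List Int) (n i : Int) (hn : 0 < n) (m : Nat) (a0 : Int) (ha : 0 ≤ a0) :
    (PySem.List.pyRange 0 (m : Int) 1).foldl
      (fun (st : Int × Int) j =>
        let x := if PySem.Int.mod j n = i then st.2 + (PySem.List.pyGet? t j).getD 0 else st.2
        (if st.1 < x then x else st.1, x))
      (a0, 0)
    = (msup a0 (chkL t n i m), csum t n i m) ∧ csum t n i m ≤ msup a0 (chkL t n i m) := by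
  induction m with
  | zero =>
    constructor
    · simp [PySem.List.pyRange_one_eq_nil le_rfl, chkL, csum, msup]
    · simpa [chkL, csum, msup] using ha
  | succ m ih =>
    have hc : ((m + 1 : Nat) : Int) = (m : Int) + 1 := by push_cast; ring
    rw [hc, PySem.List.pyRange_one_succ_right (by positivity), List.foldl_append, ih.1]
    simp only [List.foldl_cons, List.foldl_nil, PySem.Int.mod_eq_emod_of_pos hn,
      PySem.List.pyGet?_natCast]
    have hget : (t[m]?).getD 0 = t.getD m 0 := (List.getD_eq_getElem?_getD).symm
    by_cases h : (m : Int) % n = i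
    · have hx : csum t n i m + t.getD m 0 = csum t n i (m + 1) := by
        rw [csum_succ, if_pos h]
      have hch : chk t n m = csum t n i (m + 1) := by unfold chk; rw [h]
      have hL : chkL t n i (m + 1) = chkL t n i m ++ [chk t n m] := by
        rw [chkL_succ, if_pos h]
      simp only [h, hget, if_true, hx, hL, msup_append, msup_singleton, hch]
      exact ⟨by rw [ite_lt_max], le_max_right _ _⟩
    · simp only [h, if_false]
      -- (see below)
      have hx : csum t n i (m + 1) = csum t n i m := by
        rw [csum_succ, if_neg h, add_zero]
      have hL : chkL t n i (m + 1) = chkL t n i m := by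
        rw [chkL_succ, if_neg h, List.append_nil]
      rw [hx, hL, if_neg (not_lt.mpr ih.2)]
      exact ⟨rfl, ih.2⟩

-- A's outer loop: the running max over the concatenation of the per-class checkpoint lists
lemma A_outer (t : List Int) (n : Int) (hn : 0 < n) (L : Nat) (is : List Int) :
    ∀ a0 : Int, 0 ≤ a0 →
    is.foldl (fun answer i =>
      ((PySem.List.pyRange 0 (L : Int) 1).foldl
        (fun (st : Int × Int) j =>
          let x := if PySem.Int.mod j n = i then st.2 + (PySem.List.pyGet? t j).getD 0 else st.2
          (if st.1 < x then x else st.1, x))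
        (answer, 0)).1) a0
    = msup a0 (is.flatMap (fun i => chkL t n i L)) := by
  induction is with
  | nil => intro a0 _; simp [msup]
  | cons i is ih =>
    intro a0 ha
    simp only [List.foldl_cons, List.flatMap_cons]
    rw [(A_inner t n i hn L a0 ha).1]
    rw [ih (msup a0 (chkL t n i L)) (ha.trans (le_msup _ _)), msup_append]

-- the per-class index lists, concatenated over all residues, permute the full index range
lemma index_perm (n : Int) (hn : 0 < n) (m : Nat) :
    ((PySem.List.pyRange 0 n 1).flatMap
      (fun i => (List.range m).filter (fun (k : Nat) => decide ((k : Int) % n = i)))).Perm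
      (List.range m) := by
  rw [List.perm_ext_iff_of_nodup ?nd (List.nodup_range)]
  case nd =>
    rw [List.nodup_flatMap]
    refine ⟨fun i _ => (List.nodup_range).filter _, ?_⟩
    refine (PySem.List.pairwise_lt_pyRange_one 0 n).imp ?_
    intro a b hab k hka hkb
    simp only [List.mem_filter, decide_eq_true_eq] at hka hkb
    exact absurd (hka.2.symm.trans hkb.2) (ne_of_lt hab)
  · intro k
    simp only [List.mem_flatMap, List.mem_filter, List.mem_range, PySem.List.mem_pyRange_one,
      decide_eq_true_eq]
    constructor
    · rintro ⟨i, _, hk, _⟩; exact hk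
    · intro hk
      exact ⟨(k : Int) % n, ⟨Int.emod_nonneg _ (ne_of_gt hn), Int.emod_lt_of_pos _ hn⟩, hk, rfl⟩

-- B's loop invariant
lemma B_inv (t : List Int) (n : Int) (hn : 0 < n) (m : Nat) :
    (PySem.List.pyRange 0 (m : Int) 1).foldl
      (fun (st : List Int × Int) j =>
        let p : Int × Int := (j, PySem.List.pyGetD t j 0)
        let r := PySem.Int.mod p.1 n
        let v := PySem.List.pyGetD st.1 r 0 + p.2
        (PySem.List.pySetD st.1 r v, if st.2 < v then v else st.2))
      (List.replicate n.toNat 0, 0)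
    = ((List.range n.toNat).map (fun (k : Nat) => csum t n (k : Int) m),
       msup 0 ((List.range m).map (chk t n))) := by
  induction m with
  | zero =>
    have h0 : (List.range n.toNat).map (fun (k : Nat) => csum t n (k : Int) 0) = List.replicate n.toNat 0 := by
      have : (fun (k : Nat) => csum t n (k : Int) 0) = Function.const Nat (0 : Int) := by
        funext k; simp [csum]
      rw [this, List.map_const, List.length_range]
    simp [PySem.List.pyRange_one_eq_nil le_rfl, h0, msup]
  | succ m ih =>
    have hc : ((m + 1 : Nat) : Int) = (m : Int) + 1 := by push_cast; ring
    rw [hc, PySem.List.pyRange_one_succ_right (by positivity), List.foldl_append, ih]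
    simp only [List.foldl_cons, List.foldl_nil]
    have hmod := PySem.Int.mod_eq_emod_of_pos (a := (m : Int)) hn
    have h0r : 0 ≤ (m : Int) % n := Int.emod_nonneg _ (ne_of_gt hn)
    have hrn : (m : Int) % n < n := Int.emod_lt_of_pos _ hn
    have hlen : ((List.range n.toNat).map (fun (k : Nat) => csum t n (k : Int) m)).length = n.toNat := by
      simp
    have htn : ((m : Int) % n).toNat < n.toNat := by omega
    -- the value read back is the class sum so far
    have hread : PySem.List.pyGetD ((List.range n.toNat).map (fun (k : Nat) => csum t n (k : Int) m))
        ((m : Int) % n) 0 = csum t n ((m : Int) % n) m := by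
      rw [PySem.List.pyGetD_eq_getElem _ _ h0r (by rw [hlen]; omega)]
      simp only [List.getElem_map, List.getElem_range]
      rw [Int.toNat_of_nonneg h0r]
    have hval : PySem.List.pyGetD t (m : Int) 0 = t.getD m 0 := by
      simp
    have hchk : csum t n ((m : Int) % n) m + t.getD m 0 = chk t n m := by
      unfold chk; rw [csum_succ, if_pos rfl]
    -- the updated accumulator list
    have hacc : PySem.List.pySetD ((List.range n.toNat).map (fun (k : Nat) => csum t n (k : Int) m))
        ((m : Int) % n) (chk t n m)
        = (List.range n.toNat).map (fun (k : Nat) => csum t n (k : Int) (m + 1)) := by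
      rw [PySem.List.pySetD_of_nonneg _ _ h0r]
      apply List.ext_getElem
      · simp
      · intro k hk1 hk2
        simp only [List.getElem_set, List.getElem_map, List.getElem_range] at *
        by_cases hke : ((m : Int) % n).toNat = k
        · rw [if_pos hke]
          have : ((k : Nat) : Int) = (m : Int) % n := by omega
          rw [this]; unfold chk; rfl
        · rw [if_neg hke, csum_succ, if_neg, add_zero]
          intro hcon
          apply hke
          omega
    simp only [hmod, hread, hval, hchk, hacc]
    refine Prod.ext rfl ?_
    simp only [List.range_succ, List.map_append, List.map_cons, List.map_nil, msup_append,
      msup_singleton]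
    rw [ite_lt_max]

-- ===== VERDICT (by name: the statement is the Claim_ definition above) =====
lemma key (t : List Int) (n : Int) : solution t n = solution_alt t n := by
  by_cases hn : n ≤ 0
  · unfold solution solution_alt
    rw [if_pos hn, PySem.List.pyRange_one_eq_nil hn]
    rfl
  · have hn' : 0 < n := by omega
    unfold solution solution_alt
    rw [if_neg hn]
    rw [A_outer t n hn' t.length (PySem.List.pyRange 0 n 1) 0 le_rfl]
    rw [PySem.List.enumerate_eq_map_pyRange t 0, List.foldl_map, PySem.List.len_eq]
    rw [B_inv t n hn' t.length]
    unfold chkL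
    rw [← List.map_flatMap]
    exact msup_perm ((index_perm n hn' t.length).map (chk t n)) 0

theorem solution_spec : Claim_equal_solution := by
  intro t n _
  unfold Spec_solution
  exact key t n
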